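-- pv_equiv track=rewrite | github.com/hellfer/Algorithm | 백준/Bronze/28074. 모비스/모비스.py | can_form_mobis
-- ===== SOURCE A (Python) =====
-- def can_form_mobis(s):
--     required = {'M': 1, 'O': 1, 'B': 1, 'I': 1, 'S': 1}
--
--     from collections import Counter
--     count = Counter(s)
--
--     for char, needed in required.items():
--         if count[char] < needed:
--             return "NO"
--
--     return "YES"
-- ===== SOURCE B (Python) =====
-- def can_form_mobis(s):
--     mask = 0
--     for ch in s:
--         if ch == 'M':
--             mask |= 1
--         elif ch == 'O':
--             mask |= 2
--         elif ch == 'B':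
--             mask |= 4
--         elif ch == 'I':
--             mask |= 8
--         elif ch == 'S':
--             mask |= 16
--         if mask == 31:
--             return "YES"
--     return "NO"
-- ===== Notes on version B (the rewrite author's own statement) =====
-- stated objective: alternative
-- what changed: B replaces A's Counter frequency table plus per-letter lookups by a single forward pass that accumulates a 5-bit seen-mask and returns YES as soon as the mask reaches 31, never building a table or rescanning.
import Mathlib
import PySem

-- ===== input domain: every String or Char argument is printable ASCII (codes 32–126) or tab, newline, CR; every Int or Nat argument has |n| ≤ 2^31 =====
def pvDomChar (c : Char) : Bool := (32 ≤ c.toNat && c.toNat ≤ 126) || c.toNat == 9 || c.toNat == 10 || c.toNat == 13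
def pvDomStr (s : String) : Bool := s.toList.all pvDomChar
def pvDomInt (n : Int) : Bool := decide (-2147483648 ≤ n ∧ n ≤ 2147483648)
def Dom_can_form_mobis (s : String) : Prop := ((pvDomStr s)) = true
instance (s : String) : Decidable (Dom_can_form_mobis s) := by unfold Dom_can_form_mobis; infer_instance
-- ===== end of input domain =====

-- B replaces A's Counter table with a one-pass 5-bit seen-mask accumulator with early exit (return value only).
-- ===== PORT A =====
-- the for-loop over required.items() with early return "NO"
def canFormMobisGo (items : List (Char × Int)) (count : PySem.Dict Char Int) : String :=
  match items with
  | [] => "YES"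
  | (c, needed) :: rest =>
      if count.getD c 0 < needed then "NO" else canFormMobisGo rest count

def can_form_mobis (s : String) : String :=
  let required : List (Char × Int) := [('M',1),('O',1),('B',1),('I',1),('S',1)]
  let count := PySem.Dict.counter s.toList
  canFormMobisGo required count

-- ===== PORT B =====
-- the if/elif chain of Source B: which bit (if any) this character sets
def mobisBit (c : Char) : Nat :=
  if c = 'M' then 1
  else if c = 'O' then 2
  else if c = 'B' then 4
  else if c = 'I' then 8
  else if c = 'S' then 16
  else 0

-- the for-loop of Source B: update the mask, return "YES" as soon as it is 31
def canFormMobisAltGo (cs : List Char) (mask : Nat) : String :=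
  match cs with
  | [] => "NO"
  | c :: rest =>
      let m := mask ||| mobisBit c
      if m = 31 then "YES" else canFormMobisAltGo rest m

def can_form_mobis_alt (s : String) : String :=
  canFormMobisAltGo s.toList 0

-- ===== PRECONDITION & SPEC =====
def Spec_can_form_mobis (s : String) (out : String) : Prop := out = can_form_mobis_alt s
instance (s : String) (out : String) : Decidable (Spec_can_form_mobis s out) := by unfold Spec_can_form_mobis; infer_instance

-- ===== CLAIM (what is proved, stated in full; the proofs are below) =====
def Claim_equal_can_form_mobis : Prop := ∀ (s : String), Dom_can_form_mobis s → Spec_can_form_mobis s (can_form_mobis s)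

-- ===== LEMMAS AND PROOFS =====

def mobisFold (cs : List Char) (mask : Nat) : Nat :=
  List.foldl (fun m c => m ||| mobisBit c) mask cs

theorem mobisBit_lt (c : Char) : mobisBit c < 32 := by
  unfold mobisBit; split_ifs <;> norm_num

theorem mobisFold_lt (cs : List Char) (mask : Nat) (h : mask < 32) :
    mobisFold cs mask < 32 := by
  induction cs generalizing mask with
  | nil => exact h
  | cons c rest ih =>
      exact ih _ (Nat.or_lt_two_pow (n := 5) h (mobisBit_lt c))

theorem mobisFold_or (cs : List Char) (a b : Nat) :
    mobisFold cs (a ||| b) = a ||| mobisFold cs b := by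
  induction cs generalizing b with
  | nil => rfl
  | cons c rest ih =>
      simp only [mobisFold, List.foldl_cons] at *
      rw [Nat.or_assoc, ih]

theorem or31 (x : Nat) (h : x < 32) : 31 ||| x = 31 := by
  interval_cases x <;> decide

theorem mobisFold_31 (cs : List Char) : mobisFold cs 31 = 31 := by
  have h := mobisFold_or cs 31 0
  simp only [Nat.or_zero] at h
  rw [h, or31 _ (mobisFold_lt cs 0 (by norm_num))]

theorem altGo_eq (cs : List Char) (mask : Nat) (h : mask ≠ 31) :
    canFormMobisAltGo cs mask = (if mobisFold cs mask = 31 then "YES" else "NO") := by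
  induction cs generalizing mask with
  | nil => simp [canFormMobisAltGo, mobisFold, h]
  | cons c rest ih =>
      simp only [canFormMobisAltGo, mobisFold, List.foldl_cons]
      by_cases h2 : mask ||| mobisBit c = 31
      · rw [if_pos h2]
        have h31 : mobisFold rest (mask ||| mobisBit c) = 31 := by
          rw [h2]; exact mobisFold_31 rest
        simp only [show List.foldl (fun m c => m ||| mobisBit c) (mask ||| mobisBit c) rest
            = mobisFold rest (mask ||| mobisBit c) from rfl, h31]
        simp
      · rw [if_neg h2]
        exact ih _ h2

theorem testBit_mobisBit (c : Char) (i : Nat) (ch : Char)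
    (hp : (i, ch) ∈ [(0,'M'),(1,'O'),(2,'B'),(3,'I'),(4,'S')]) :
    Nat.testBit (mobisBit c) i = (c == ch) := by
  unfold mobisBit
  fin_cases hp <;> split_ifs <;> simp_all <;> decide

theorem testBit_mobisFold (cs : List Char) (i : Nat) (ch : Char)
    (hp : (i, ch) ∈ [(0,'M'),(1,'O'),(2,'B'),(3,'I'),(4,'S')]) :
    Nat.testBit (mobisFold cs 0) i = cs.contains ch := by
  induction cs with
  | nil =>
      fin_cases hp <;> simp [mobisFold]
  | cons c rest ih =>
      have h0 : mobisFold (c :: rest) 0 = mobisBit c ||| mobisFold rest 0 := by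
        simp only [mobisFold, List.foldl_cons, Nat.zero_or]
        have := mobisFold_or rest (mobisBit c) 0
        simpa using this
      rw [h0, Nat.testBit_or, testBit_mobisBit c i ch hp, ih]
      by_cases hc : c = ch
      · subst hc; simp
      · simp [hc, Ne.symm hc]

theorem mem_of_mobisFold (cs : List Char) (h : mobisFold cs 0 = 31) (i : Nat) (ch : Char)
    (hp : (i, ch) ∈ [(0,'M'),(1,'O'),(2,'B'),(3,'I'),(4,'S')])
    (hb : Nat.testBit 31 i = true) : ch ∈ cs := by
  have ht := testBit_mobisFold cs i ch hp
  rw [h, hb] at ht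
  simpa using ht.symm

theorem mobisFold_eq_31 (cs : List Char) :
    (mobisFold cs 0 = 31) ↔
      ('M' ∈ cs ∧ 'O' ∈ cs ∧ 'B' ∈ cs ∧ 'I' ∈ cs ∧ 'S' ∈ cs) := by
  constructor
  · intro h
    exact ⟨mem_of_mobisFold cs h 0 'M' (by decide) (by decide),
           mem_of_mobisFold cs h 1 'O' (by decide) (by decide),
           mem_of_mobisFold cs h 2 'B' (by decide) (by decide),
           mem_of_mobisFold cs h 3 'I' (by decide) (by decide),
           mem_of_mobisFold cs h 4 'S' (by decide) (by decide)⟩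
  · rintro ⟨hM, hO, hB, hI, hS⟩
    apply Nat.eq_of_testBit_eq
    intro i
    match i with
    | 0 => rw [testBit_mobisFold cs 0 'M' (by decide), show Nat.testBit 31 0 = true from by decide]; simpa using hM
    | 1 => rw [testBit_mobisFold cs 1 'O' (by decide), show Nat.testBit 31 1 = true from by decide]; simpa using hO
    | 2 => rw [testBit_mobisFold cs 2 'B' (by decide), show Nat.testBit 31 2 = true from by decide]; simpa using hB
    | 3 => rw [testBit_mobisFold cs 3 'I' (by decide), show Nat.testBit 31 3 = true from by decide]; simpa using hI
    | 4 => rw [testBit_mobisFold cs 4 'S' (by decide), show Nat.testBit 31 4 = true from by decide]; simpa using hS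
    | (n+5) =>
        have hpow : (32 : Nat) ≤ 2 ^ (n + 5) := by
          have := Nat.pow_le_pow_right (show 0 < 2 by norm_num) (show 5 ≤ n + 5 by omega)
          simpa using this
        have h1 : mobisFold cs 0 < 2 ^ (n + 5) :=
          lt_of_lt_of_le (mobisFold_lt cs 0 (by norm_num)) hpow
        have h2 : (31 : Nat) < 2 ^ (n + 5) := lt_of_lt_of_le (by norm_num) hpow
        rw [Nat.testBit_lt_two_pow h1, Nat.testBit_lt_two_pow h2]

-- ===== VERDICT (by name: the statement is the Claim_ definition above) =====
theorem can_form_mobis_spec : Claim_equal_can_form_mobis := by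
  intro s _
  unfold Spec_can_form_mobis can_form_mobis can_form_mobis_alt
  rw [altGo_eq _ _ (by norm_num)]
  by_cases hM : 'M' ∈ s.toList <;>
  by_cases hO : 'O' ∈ s.toList <;>
  by_cases hB : 'B' ∈ s.toList <;>
  by_cases hI : 'I' ∈ s.toList <;>
  by_cases hS : 'S' ∈ s.toList <;>
  simp [canFormMobisGo, PySem.Dict.getD_counter, List.count_eq_zero,
        mobisFold_eq_31, hM, hO, hB, hI, hS]
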